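-- pv_equiv track=rewrite | github.com/krob2610/SkiTurnDetection | app/workflow/utils.py | find_midpoints
-- ===== SOURCE A (Python) =====
-- from copy import deepcopy
--
-- def find_midpoints(mins_l, maxs_l):
--     mins, maxs = deepcopy(mins_l), deepcopy(maxs_l)
--     midpoints_mins = []
--     midpoints_maxs = []
--
--     def calculate_midpoints(source_list, target_list):
--         midpoints = []
--         for value in source_list:
--             greater_value = next((x for x in target_list if x > value), None)
--             if greater_value is not None:
--                 midpoints.append(int((value + greater_value) / 2))
--         return midpoints
--
--     midpoints_mins = calculate_midpoints(mins, maxs)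
--     midpoints_maxs = calculate_midpoints(maxs, mins)
--
--     return midpoints_mins, midpoints_maxs
-- ===== SOURCE B (Python) =====
-- def find_midpoints(mins_l, maxs_l):
--     def mids(source, target):
--         # prefix maxima of target: pm[i] = max(target[:i+1]); nondecreasing
--         pm = []
--         cur = None
--         for x in target:
--             if cur is None or x > cur:
--                 cur = x
--             pm.append(cur)
--         n = len(pm)
--         out = []
--         for v in source:
--             # binary search: least index lo with pm[lo] > v (= least index with target[lo] > v)
--             lo, hi = 0, n
--             while lo < hi:
--                 mid = (lo + hi) // 2
--                 if pm[mid] <= v: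
--                     lo = mid + 1
--                 else:
--                     hi = mid
--             if lo < n:
--                 s = v + target[lo]
--                 out.append(s // 2 if s >= 0 else -(-s // 2))  # truncated average
--         return out
--     return mids(mins_l, maxs_l), mids(maxs_l, mins_l)
-- ===== Notes on version B (the rewrite author's own statement) =====
-- stated objective: faster
-- what changed: Replaces A's linear scan of the target list for each source value by a precomputed prefix-maxima list plus a binary search for the first index whose prefix maximum exceeds the value.
import Mathlib
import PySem

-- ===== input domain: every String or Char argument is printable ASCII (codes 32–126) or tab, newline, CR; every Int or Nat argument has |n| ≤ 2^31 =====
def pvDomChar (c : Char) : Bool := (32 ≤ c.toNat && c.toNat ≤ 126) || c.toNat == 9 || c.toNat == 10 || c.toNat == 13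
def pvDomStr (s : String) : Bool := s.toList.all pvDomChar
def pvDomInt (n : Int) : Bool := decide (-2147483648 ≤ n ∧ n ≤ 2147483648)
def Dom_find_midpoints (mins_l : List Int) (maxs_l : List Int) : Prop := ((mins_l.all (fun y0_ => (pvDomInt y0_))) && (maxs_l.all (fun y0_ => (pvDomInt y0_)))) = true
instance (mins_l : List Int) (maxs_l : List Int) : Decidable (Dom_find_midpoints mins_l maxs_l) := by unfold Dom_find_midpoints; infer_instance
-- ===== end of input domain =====

-- B replaces A's O(n·m) linear scan per value by prefix maxima of the target plus a binary search (faster, asymptotic).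

-- ===== PORT A =====
-- next((x for x in target_list if x > value), None): first element greater than v
def fmFirstGreater (target : List Int) (v : Int) : Option Int :=
  match target with
  | [] => none
  | x :: rest => if v < x then some x else fmFirstGreater rest v

-- int((value + greater)/2): truncation toward zero; exact as Int.tdiv on the |n| ≤ 2^31 domain
def fmCalc (source target : List Int) : List Int :=
  source.foldl (fun acc v =>
    match fmFirstGreater target v with
    | some g => acc ++ [Int.tdiv (v + g) 2]
    | none => acc) []

def find_midpoints (mins_l : List Int) (maxs_l : List Int) : List Int × List Int :=
  (fmCalc mins_l maxs_l, fmCalc maxs_l mins_l)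

-- ===== PORT B =====
-- the pm list built by B's first loop (cur starts as None)
def fmPrefixMaxAux (cur : Option Int) (t : List Int) : List Int :=
  match t with
  | [] => []
  | x :: rest =>
    let c := match cur with
      | none => x
      | some c0 => if c0 < x then x else c0
    c :: fmPrefixMaxAux (some c) rest

-- B's while loop: binary search for the least index lo with pm[lo] > v
def fmGo (pm : List Int) (v : Int) (lo hi : Nat) : Nat :=
  if _h : lo < hi then
    if pm.getD ((lo + hi) / 2) 0 ≤ v then fmGo pm v ((lo + hi) / 2 + 1) hi
    else fmGo pm v lo ((lo + hi) / 2)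
  else lo
termination_by hi - lo
decreasing_by all_goals omega

-- s // 2 if s >= 0 else -(-s // 2): truncated average, = Int.tdiv s 2
def fmAltCalc (source target : List Int) : List Int :=
  let pm := fmPrefixMaxAux none target
  let n := pm.length
  source.foldl (fun acc v =>
    let lo := fmGo pm v 0 n
    if lo < n then acc ++ [Int.tdiv (v + target.getD lo 0) 2] else acc) []

def find_midpoints_alt (mins_l : List Int) (maxs_l : List Int) : List Int × List Int :=
  (fmAltCalc mins_l maxs_l, fmAltCalc maxs_l mins_l)

-- ===== PRECONDITION & SPEC =====
def Spec_find_midpoints (mins_l : List Int) (maxs_l : List Int) (out : List Int × List Int) : Prop := out = find_midpoints_alt mins_l maxs_l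
instance (mins_l : List Int) (maxs_l : List Int) (out : List Int × List Int) : Decidable (Spec_find_midpoints mins_l maxs_l out) := by unfold Spec_find_midpoints; infer_instance

-- ===== CLAIM (what is proved, stated in full; the proofs are below) =====
def Claim_equal_find_midpoints : Prop := ∀ (mins_l : List Int) (maxs_l : List Int), Dom_find_midpoints mins_l maxs_l → Spec_find_midpoints mins_l maxs_l (find_midpoints mins_l maxs_l)

-- ===== LEMMAS AND PROOFS =====

theorem fmPrefixMaxAux_length (cur : Option Int) (t : List Int) :
    (fmPrefixMaxAux cur t).length = t.length := by
  induction t generalizing cur with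
  | nil => rfl
  | cons x rest ih => simp [fmPrefixMaxAux, ih]

theorem fmPrefixMaxAux_le (cur : Option Int) (t : List Int) (i : Nat) (hi : i < t.length) :
    t.getD i 0 ≤ (fmPrefixMaxAux cur t).getD i 0 := by
  induction t generalizing cur i with
  | nil => simp at hi
  | cons x rest ih =>
    cases i with
    | zero =>
      cases cur with
      | none => simp [fmPrefixMaxAux]
      | some c0 => simp [fmPrefixMaxAux]; split <;> omega
    | succ i' =>
      simpa [fmPrefixMaxAux] using ih _ i' (by simpa using hi)

theorem fmPrefixMaxAux_lb (c : Int) (t : List Int) (i : Nat) (hi : i < t.length) :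
    c ≤ (fmPrefixMaxAux (some c) t).getD i 0 := by
  induction t generalizing c i with
  | nil => simp at hi
  | cons x rest ih =>
    cases i with
    | zero => simp [fmPrefixMaxAux]; split <;> omega
    | succ i' =>
      have h1 : c ≤ (if c < x then x else c) := by split <;> omega
      have h2 := ih (if c < x then x else c) i' (by simpa using hi)
      simp only [fmPrefixMaxAux, List.getD_cons_succ]
      omega

theorem fmPrefixMaxAux_mono (cur : Option Int) (t : List Int) (i j : Nat)
    (hij : i ≤ j) (hj : j < t.length) :
    (fmPrefixMaxAux cur t).getD i 0 ≤ (fmPrefixMaxAux cur t).getD j 0 := by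
  induction t generalizing cur i j with
  | nil => simp at hj
  | cons x rest ih =>
    cases i with
    | zero =>
      cases j with
      | zero => exact le_refl _
      | succ j' =>
        have := fmPrefixMaxAux_lb (match cur with | none => x | some c0 => if c0 < x then x else c0)
          rest j' (by simpa using hj)
        simp only [fmPrefixMaxAux, List.getD_cons_zero, List.getD_cons_succ]
        exact this
    | succ i' =>
      cases j with
      | zero => omega
      | succ j' =>
        have := ih (some (match cur with | none => x | some c0 => if c0 < x then x else c0))
          i' j' (by omega) (by simpa using hj)
        simpa [fmPrefixMaxAux] using this

-- if pm is ≤ v strictly before r and > v at r (and cur ≤ v), then target itself exceeds v at r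
theorem fmPrefixMaxAux_hit (t : List Int) (v : Int) :
    ∀ (cur : Option Int) (r : Nat), r < t.length →
    (∀ k, k < r → (fmPrefixMaxAux cur t).getD k 0 ≤ v) →
    v < (fmPrefixMaxAux cur t).getD r 0 →
    (∀ c, cur = some c → c ≤ v) →
    v < t.getD r 0 := by
  induction t with
  | nil => intro cur r hr; simp at hr
  | cons x rest ih =>
    intro cur r hr hk hv hc
    cases r with
    | zero =>
      cases cur with
      | none => simpa [fmPrefixMaxAux] using hv
      | some c0 =>
        have hc0 : c0 ≤ v := hc c0 rfl
        simp only [fmPrefixMaxAux, List.getD_cons_zero] at hv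
        simp only [List.getD_cons_zero]
        by_cases h : c0 < x
        · simpa [h] using hv
        · simp [h] at hv; omega
    | succ r' =>
      cases cur with
      | none =>
        have hc' : x ≤ v := by
          have := hk 0 (by omega)
          simpa [fmPrefixMaxAux] using this
        have := ih (some x) r' (by simpa using hr)
          (fun k hk' => by
            have := hk (k + 1) (by omega)
            simpa [fmPrefixMaxAux] using this)
          (by simpa [fmPrefixMaxAux] using hv)
          (fun c hc'' => by rw [Option.some.injEq] at hc''; omega)
        simpa using this
      | some c0 =>
        have hc' : (if c0 < x then x else c0) ≤ v := by
          have := hk 0 (by omega)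
          simpa [fmPrefixMaxAux] using this
        have := ih (some (if c0 < x then x else c0)) r' (by simpa using hr)
          (fun k hk' => by
            have := hk (k + 1) (by omega)
            simpa [fmPrefixMaxAux] using this)
          (by simpa [fmPrefixMaxAux] using hv)
          (fun c hc'' => by rw [Option.some.injEq] at hc''; omega)
        simpa using this

-- A's linear scan returns target[r] when r is the least index with target[r] > v
theorem fmFirstGreater_of_least (t : List Int) (v : Int) :
    ∀ (r : Nat), r ≤ t.length →
    (∀ i, i < r → t.getD i 0 ≤ v) →
    (r < t.length → v < t.getD r 0) →
    fmFirstGreater t v = if r < t.length then some (t.getD r 0) else none := by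
  induction t with
  | nil =>
    intro r hr _ _
    simp at hr
    simp [fmFirstGreater, hr]
  | cons x rest ih =>
    intro r hr hlt hge
    cases r with
    | zero =>
      have hx : v < x := by simpa using hge (by simp)
      simp [fmFirstGreater, hx]
    | succ r' =>
      have hx : ¬ v < x := by
        have := hlt 0 (by omega)
        simp at this; omega
      have := ih r' (by simpa using hr)
        (fun i hi => by simpa using hlt (i + 1) (by omega))
        (fun h => by simpa using hge (by simpa using h))
      simp only [fmFirstGreater, if_neg hx, this, List.length_cons, List.getD_cons_succ]
      split <;> split <;> first | rfl | omega

theorem fmGo_spec (pm : List Int) (v : Int)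
    (mono : ∀ i j, i ≤ j → j < pm.length → pm.getD i 0 ≤ pm.getD j 0)
    (lo hi : Nat) (hhi : hi ≤ pm.length) (hlohi : lo ≤ hi)
    (hbelow : ∀ i, i < lo → pm.getD i 0 ≤ v)
    (habove : ∀ i, hi ≤ i → i < pm.length → v < pm.getD i 0) :
    lo ≤ fmGo pm v lo hi ∧ fmGo pm v lo hi ≤ hi ∧
    (∀ i, i < fmGo pm v lo hi → pm.getD i 0 ≤ v) ∧
    (fmGo pm v lo hi < pm.length → v < pm.getD (fmGo pm v lo hi) 0) := by
  induction lo, hi using fmGo.induct pm v with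
  | case1 lo hi h hle ih =>
    rw [fmGo, dif_pos h, if_pos hle]
    have hmid : (lo + hi) / 2 < hi := by omega
    have := ih (by omega) (by omega)
      (fun i hi' => le_trans (mono i ((lo + hi) / 2) (by omega) (by omega)) hle)
      habove
    exact ⟨by omega, this.2.1, this.2.2.1, this.2.2.2⟩
  | case2 lo hi h hgt ih =>
    rw [fmGo, dif_pos h, if_neg hgt]
    have := ih (by omega) (by omega) hbelow
      (fun i hi1 hi2 => lt_of_lt_of_le (by omega) (mono ((lo + hi) / 2) i hi1 hi2))
    exact ⟨this.1, by omega, this.2.2.1, this.2.2.2⟩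
  | case3 lo hi h =>
    rw [fmGo, dif_neg h]
    exact ⟨le_refl _, by omega, hbelow, fun hlt => habove lo (by omega) hlt⟩

theorem per_v (target : List Int) (v : Int) :
    fmFirstGreater target v =
      (if fmGo (fmPrefixMaxAux none target) v 0 (fmPrefixMaxAux none target).length
            < (fmPrefixMaxAux none target).length
       then some (target.getD (fmGo (fmPrefixMaxAux none target) v 0 (fmPrefixMaxAux none target).length) 0)
       else none) := by
  set pm := fmPrefixMaxAux none target with hpm
  have hlen : pm.length = target.length := fmPrefixMaxAux_length none target
  have mono : ∀ i j, i ≤ j → j < pm.length → pm.getD i 0 ≤ pm.getD j 0 := by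
    intro i j hij hj
    exact fmPrefixMaxAux_mono none target i j hij (by omega)
  obtain ⟨h1, h2, h3, h4⟩ := fmGo_spec pm v mono 0 pm.length (le_refl _) (by omega)
    (by omega) (by omega)
  set r := fmGo pm v 0 pm.length with hr
  have hle : ∀ i, i < r → target.getD i 0 ≤ v := by
    intro i hi
    exact le_trans (fmPrefixMaxAux_le none target i (by omega)) (h3 i hi)
  have hgt : r < target.length → v < target.getD r 0 := by
    intro hrl
    exact fmPrefixMaxAux_hit target v none r hrl h3 (h4 (by omega)) (by simp)
  have := fmFirstGreater_of_least target v r (by omega) hle hgt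
  rw [this]
  split <;> split <;> first | rfl | omega

theorem fmAltCalc_eq (source target : List Int) :
    fmAltCalc source target = fmCalc source target := by
  unfold fmAltCalc fmCalc
  simp only []
  congr 1
  funext acc v
  rw [per_v target v]
  split
  · rfl
  · rfl

theorem find_midpoints_spec : Claim_equal_find_midpoints := by
  intro mins_l maxs_l _
  unfold Spec_find_midpoints find_midpoints find_midpoints_alt
  rw [fmAltCalc_eq, fmAltCalc_eq]
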